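-- pv_equiv track=rewrite | github.com/maheshbabugorantla/DataStructures_and_Algorithms_Specialization | 1_Algorithmic_Toolbox/week5_dynamic_programming1/2_primitive_calculator/primitive_calculator.py | optimal_operations
-- ===== SOURCE A (Python) =====
-- def optimal_operations(n):
--
--     min_operations = [0] * (n + 1)
--
--     min_operation_sequence = []
--     min_operation_sequence.append([0]) # 0
--     min_operation_sequence.append([1]) # 1
--
--     for val in range(2, n+1):
--         min_op_3, min_op_2, min_op_1 = (float('Inf'),) * 3 # float('Inf'), float('Inf')
--
--         if val % 3 == 0:
--             min_op_3 = min_operations[val // 3] + 1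
--         elif val % 2 == 0:
--             min_op_2 = min_operations[val // 2] + 1
--         min_op_1 = min_operations[val - 1] + 1
--         min_operations[val] = min(min_op_1, min_op_2, min_op_3)
--
--         if min_operations[val] == min_op_3:
--             min_operation_sequence.append(min_operation_sequence[val // 3] + [val])
--         elif min_operations[val] == min_op_2:
--             min_operation_sequence.append(min_operation_sequence[val // 2] + [val])
--         else:
--             min_operation_sequence.append(min_operation_sequence[val - 1] + [val])
--
--     return min_operation_sequence[-1]
-- ===== SOURCE B (Python) =====
-- def optimal_operations(n):
--     if n <= 1:
--         return [1]
--     cost = [0] * (n + 1)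
--     for v in range(2, n + 1):
--         best = cost[v - 1] + 1
--         if v % 3 == 0:
--             c = cost[v // 3] + 1
--             if c < best:
--                 best = c
--         elif v % 2 == 0:
--             c = cost[v // 2] + 1
--             if c < best:
--                 best = c
--         cost[v] = best
--     path = []
--     v = n
--     while v > 1:
--         path.append(v)
--         if v % 3 == 0:
--             v = v // 3 if cost[v] == cost[v // 3] + 1 else v - 1
--         elif v % 2 == 0 and cost[v] == cost[v // 2] + 1:
--             v //= 2
--         else:
--             v -= 1
--     path.append(1)
--     return list(reversed(path))
-- ===== Notes on version B (the rewrite author's own statement) =====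
-- stated objective: faster
-- what changed: Instead of storing a full operation sequence list for every value 0..n (quadratic total work/space), B fills only an integer cost array in one pass and then reconstructs the single path by backtracking from n with the same preference order (/3, then /2, then -1), reversing at the end.
import Mathlib
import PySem

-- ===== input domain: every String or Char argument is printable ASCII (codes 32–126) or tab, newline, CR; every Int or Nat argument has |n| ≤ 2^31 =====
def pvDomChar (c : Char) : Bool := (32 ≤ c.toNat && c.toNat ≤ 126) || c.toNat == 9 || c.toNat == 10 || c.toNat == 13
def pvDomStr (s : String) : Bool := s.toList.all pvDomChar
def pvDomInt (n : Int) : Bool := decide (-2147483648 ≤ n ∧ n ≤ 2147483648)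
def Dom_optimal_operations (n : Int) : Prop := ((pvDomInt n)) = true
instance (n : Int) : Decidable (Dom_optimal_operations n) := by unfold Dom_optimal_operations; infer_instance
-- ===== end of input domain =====

-- B replaces A's per-value stored operation sequences (quadratic total work) by an O(n) integer
-- cost array plus a single backtracking pass with the same tie-break order; equal return values.


-- ===== PORT A =====
-- Python's min over values that are either an int or the sentinel float('Inf');
-- the sentinel is ported as `none` (it only ever acts as +infinity in `min` and `==`).
def pvInfMin (x : Int) (o : Option Int) : Int :=
  match o with
  | none => x
  | some y => min x y

-- one iteration of A's `for val in range(2, n+1)` loop; state = (min_operations, min_operation_sequence)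
def aStep (st : List Int × List (List Int)) (val : Int) : List Int × List (List Int) :=
  let costs := st.1
  let seqs := st.2
  let min_op_3 : Option Int :=
    if PySem.Int.mod val 3 = 0 then some (PySem.List.pyGetD costs (PySem.Int.floordiv val 3) 0 + 1) else none
  let min_op_2 : Option Int :=
    if PySem.Int.mod val 3 = 0 then none
    else if PySem.Int.mod val 2 = 0 then some (PySem.List.pyGetD costs (PySem.Int.floordiv val 2) 0 + 1) else none
  let min_op_1 : Int := PySem.List.pyGetD costs (val - 1) 0 + 1
  let m : Int := pvInfMin (pvInfMin min_op_1 min_op_2) min_op_3   -- min(min_op_1, min_op_2, min_op_3)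
  let costs' := PySem.List.pySetD costs val m                     -- index always in range here, Python never raises
  let mval := PySem.List.pyGetD costs' val 0                      -- min_operations[val], re-read as A does
  let seqs' :=
    if some mval = min_op_3 then
      seqs ++ [PySem.List.pyGetD seqs (PySem.Int.floordiv val 3) [] ++ [val]]
    else if some mval = min_op_2 then
      seqs ++ [PySem.List.pyGetD seqs (PySem.Int.floordiv val 2) [] ++ [val]]
    else
      seqs ++ [PySem.List.pyGetD seqs (val - 1) [] ++ [val]]
  (costs', seqs')

def optimal_operations (n : Int) : List Int :=
  let min_operations : List Int := List.replicate (n + 1).toNat 0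
  let min_operation_sequence : List (List Int) := [[0], [1]]
  let st := (PySem.List.pyRange 2 (n + 1) 1).foldl aStep (min_operations, min_operation_sequence)
  PySem.List.pyGetD st.2 (-1) []   -- min_operation_sequence[-1]; the list is never empty

-- ===== PORT B =====
-- one iteration of B's cost-filling loop
def bStep (cost : List Int) (v : Int) : List Int :=
  let best := PySem.List.pyGetD cost (v - 1) 0 + 1
  let best :=
    if PySem.Int.mod v 3 = 0 then
      let c := PySem.List.pyGetD cost (PySem.Int.floordiv v 3) 0 + 1
      if c < best then c else best
    else if PySem.Int.mod v 2 = 0 then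
      let c := PySem.List.pyGetD cost (PySem.Int.floordiv v 2) 0 + 1
      if c < best then c else best
    else best
  PySem.List.pySetD cost v best

-- B's `while v > 1` backtracking loop; `path` is the accumulator
def bBack (cost : List Int) (v : Int) (path : List Int) : List Int :=
  if h : 1 < v then
    let path' := path ++ [v]
    if PySem.Int.mod v 3 = 0 then
      if PySem.List.pyGetD cost v 0 = PySem.List.pyGetD cost (PySem.Int.floordiv v 3) 0 + 1 then
        bBack cost (PySem.Int.floordiv v 3) path'
      else
        bBack cost (v - 1) path'
    else if PySem.Int.mod v 2 = 0 ∧ PySem.List.pyGetD cost v 0 = PySem.List.pyGetD cost (PySem.Int.floordiv v 2) 0 + 1 then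
      bBack cost (PySem.Int.floordiv v 2) path'
    else
      bBack cost (v - 1) path'
  else
    path ++ [1]   -- path.append(1)
termination_by v.toNat
decreasing_by
  · rw [PySem.Int.floordiv_eq_ediv_of_pos (by norm_num)]
    have h1 : v / 3 < v := Int.ediv_lt_of_lt_mul (by norm_num) (by omega)
    have h2 : 0 ≤ v / 3 := Int.ediv_nonneg (by omega) (by norm_num)
    omega
  · omega
  · rw [PySem.Int.floordiv_eq_ediv_of_pos (by norm_num)]
    have h1 : v / 2 < v := Int.ediv_lt_of_lt_mul (by norm_num) (by omega)
    have h2 : 0 ≤ v / 2 := Int.ediv_nonneg (by omega) (by norm_num)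
    omega
  · omega

def optimal_operations_alt (n : Int) : List Int :=
  if n ≤ 1 then [1]
  else
    let cost := (PySem.List.pyRange 2 (n + 1) 1).foldl bStep (List.replicate (n + 1).toNat 0)
    (bBack cost n []).reverse   -- list(reversed(path))

-- ===== PRECONDITION & SPEC =====
def Spec_optimal_operations (n : Int) (out : List Int) : Prop := out = optimal_operations_alt n
instance (n : Int) (out : List Int) : Decidable (Spec_optimal_operations n out) := by unfold Spec_optimal_operations; infer_instance

-- ===== CLAIM (what is proved, stated in full; the proofs are below) =====
def Claim_equal_optimal_operations : Prop := ∀ (n : Int), Dom_optimal_operations n → Spec_optimal_operations n (optimal_operations n)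

-- ===== LEMMAS AND PROOFS =====

-- the common DP cost of reaching v (0 at v <= 1), with A's `elif` recurrence
def costF (v : Nat) : Int :=
  if v <= 1 then 0
  else
    let c1 := costF (v - 1) + 1
    if v % 3 = 0 then min (costF (v / 3) + 1) c1
    else if v % 2 = 0 then min (costF (v / 2) + 1) c1
    else c1
termination_by v
decreasing_by
  · omega
  · exact Nat.div_lt_self (by omega) (by omega)
  · exact Nat.div_lt_self (by omega) (by omega)

-- the predecessor both programs pick for v >= 2 (same tie-break order)
def prevF (v : Nat) : Nat :=
  if v % 3 = 0 then
    if costF v = costF (v / 3) + 1 then v / 3 else v - 1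
  else if v % 2 = 0 ∧ costF v = costF (v / 2) + 1 then v / 2
  else v - 1

lemma prevF_lt (v : Nat) (h : 2 <= v) : prevF v < v := by
  unfold prevF
  have h3 : v / 3 < v := Nat.div_lt_self (by omega) (by omega)
  have h2 : v / 2 < v := Nat.div_lt_self (by omega) (by omega)
  split_ifs <;> omega

-- the operation sequence A stores for v and B reconstructs
def seqF (v : Nat) : List Int :=
  if v = 0 then [0]
  else if v = 1 then [1]
  else seqF (prevF v) ++ [(v : Int)]
termination_by v
decreasing_by exact prevF_lt v (by omega)

lemma costF_le_one (v : Nat) (h : v <= 1) : costF v = 0 := by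
  rw [costF]; simp [h]

lemma costF_two (v : Nat) (h : 2 <= v) : costF v =
    if v % 3 = 0 then min (costF (v / 3) + 1) (costF (v - 1) + 1)
    else if v % 2 = 0 then min (costF (v / 2) + 1) (costF (v - 1) + 1)
    else costF (v - 1) + 1 := by
  rw [costF]; simp [show ¬ v <= 1 by omega]

lemma seqF_zero : seqF 0 = [0] := by rw [seqF]; simp
lemma seqF_one : seqF 1 = [1] := by rw [seqF]; simp

lemma seqF_two (v : Nat) (h : 2 <= v) : seqF v = seqF (prevF v) ++ [(v : Int)] := by
  rw [seqF]; simp [show v ≠ 0 by omega, show v ≠ 1 by omega]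

-- cast bridges for the numeral divisors 3 and 2
lemma fdiv3 (v : Nat) : PySem.Int.floordiv (v : Int) 3 = ((v / 3 : Nat) : Int) := by
  exact_mod_cast PySem.Int.floordiv_natCast v 3
lemma fdiv2 (v : Nat) : PySem.Int.floordiv (v : Int) 2 = ((v / 2 : Nat) : Int) := by
  exact_mod_cast PySem.Int.floordiv_natCast v 2
lemma mod3 (v : Nat) : PySem.Int.mod (v : Int) 3 = ((v % 3 : Nat) : Int) := by
  exact_mod_cast PySem.Int.mod_natCast v 3
lemma mod2 (v : Nat) : PySem.Int.mod (v : Int) 2 = ((v % 2 : Nat) : Int) := by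
  exact_mod_cast PySem.Int.mod_natCast v 2
lemma cast_sub_one (v : Nat) (h : 1 <= v) : ((v : Int) - 1) = ((v - 1 : Nat) : Int) := by omega

-- B's step, on a list whose read positions already hold costF, writes costF v
lemma bStep_eq (c : List Int) (v : Nat) (hv : 2 <= v)
    (r1 : c.getD (v - 1) 0 = costF (v - 1))
    (r3 : c.getD (v / 3) 0 = costF (v / 3))
    (r2 : c.getD (v / 2) 0 = costF (v / 2)) :
    bStep c (v : Int) = c.set v (costF v) := by
  simp only [bStep, cast_sub_one v (by omega), fdiv3, fdiv2, mod3, mod2,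
    PySem.List.pyGetD_natCast, PySem.List.pySetD_natCast, r1, r2, r3]
  congr 1
  rw [costF_two v hv]
  by_cases c3 : v % 3 = 0
  · simp only [c3, Nat.cast_zero, if_pos rfl]
    rw [min_def]; split_ifs <;> omega
  · have : ¬ ((v % 3 : Nat) : Int) = 0 := by omega
    simp only [this, if_neg, c3, if_false]
    by_cases c2 : v % 2 = 0
    · have h2' : ((v % 2 : Nat) : Int) = 0 := by omega
      simp only [c2, h2', if_pos rfl]
      rw [min_def]; split_ifs <;> omega
    · have h2' : ¬ ((v % 2 : Nat) : Int) = 0 := by omega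
      simp only [h2', if_neg, c2, if_false]

-- A's step, under the same read hypotheses, writes the same cost and appends seqF v
lemma aStep_eq (c : List Int) (s : List (List Int)) (v : Nat) (hv : 2 <= v) (hlen : v < c.length)
    (r1 : c.getD (v - 1) 0 = costF (v - 1))
    (r3 : c.getD (v / 3) 0 = costF (v / 3))
    (r2 : c.getD (v / 2) 0 = costF (v / 2))
    (s1 : s.getD (v - 1) [] = seqF (v - 1))
    (s3 : s.getD (v / 3) [] = seqF (v / 3))
    (s2 : s.getD (v / 2) [] = seqF (v / 2)) :
    aStep (c, s) (v : Int) = (c.set v (costF v), s ++ [seqF v]) := by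
  have hread : ∀ x : Int, (c.set v x).getD v 0 = x := by
    intro x; simp [List.getD_eq_getElem?_getD, hlen]
  simp only [aStep, cast_sub_one v (by omega), fdiv3, fdiv2, mod3, mod2,
    PySem.List.pyGetD_natCast, PySem.List.pySetD_natCast, r1, r2, r3, s1, s2, s3]
  rw [seqF_two v hv]
  unfold prevF
  by_cases c3 : v % 3 = 0
  · have h3' : ((v % 3 : Nat) : Int) = 0 := by rw [c3]; simp
    have d3 : (3 : Int) ∣ (v : Int) := by omega
    simp only [h3', reduceIte, pvInfMin, hread]
    have hval : min (costF (v - 1) + 1) (costF (v / 3) + 1) = costF v := by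
      rw [costF_two v hv, if_pos c3, min_comm]
    rw [hval]
    by_cases he : costF v = costF (v / 3) + 1
    · simp [he, c3, d3]
    · simp [he, c3, d3]
  · have h3' : ¬ ((v % 3 : Nat) : Int) = 0 := by omega
    have d3 : ¬ (3 : Int) ∣ (v : Int) := by omega
    simp only [if_neg h3', pvInfMin, hread]
    by_cases c2 : v % 2 = 0
    · have h2' : ((v % 2 : Nat) : Int) = 0 := by rw [c2]; simp
      have d2 : (2 : Int) ∣ (v : Int) := by omega
      have e2 : ((v : Int)) % 2 = 0 := by omega
      simp only [h2', reduceIte]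
      have hval : min (costF (v - 1) + 1) (costF (v / 2) + 1) = costF v := by
        rw [costF_two v hv, if_neg c3, if_pos c2, min_comm]
      rw [hval]
      by_cases he : costF v = costF (v / 2) + 1
      · simp [he, c2, c3, d3, d2, e2]
      · simp [he, c2, c3, d3, d2, e2]
    · have h2' : ¬ ((v % 2 : Nat) : Int) = 0 := by omega
      have d2 : ¬ (2 : Int) ∣ (v : Int) := by omega
      have e2 : ((v : Int)) % 2 = 1 := by omega
      simp only [if_neg h2', reduceIte]
      have hval : costF (v - 1) + 1 = costF v := by
        rw [costF_two v hv, if_neg c3, if_neg c2]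
      rw [hval]
      simp [c2, c3, d3, d2, e2]

-- the processed prefix of range(2, n+1), as a list of casts
def rlist (j : Nat) : List Int := (List.range j).map (fun k => ((k + 2 : Nat) : Int))

def costsUpTo (N j : Nat) : List Int := (rlist j).foldl bStep (List.replicate (N + 1) 0)

def stateA (N j : Nat) : List Int × List (List Int) :=
  (rlist j).foldl aStep (List.replicate (N + 1) (0 : Int), ([[0], [1]] : List (List Int)))

-- joint loop invariant: after processing 2..j+1, the cost array holds costF on 0..j+1,
-- the two cost arrays coincide, and A's sequence list is seqF on 0..j+1
lemma inv (N : Nat) (hN : 2 <= N) : ∀ j, j + 1 <= N →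
    (costsUpTo N j).length = N + 1 ∧
    (∀ i, i <= j + 1 → (costsUpTo N j).getD i 0 = costF i) ∧
    stateA N j = (costsUpTo N j, (List.range (j + 2)).map seqF) := by
  intro j
  induction j with
  | zero =>
    intro _
    refine ⟨by simp [costsUpTo, rlist], ?_, ?_⟩
    · intro i hi
      have hi' : i < N + 1 := by omega
      simp [costsUpTo, rlist, List.getD_eq_getElem?_getD, hi', costF_le_one i hi]
    · simp [stateA, costsUpTo, rlist, List.range_succ, seqF_zero, seqF_one]
  | succ j ih =>
    intro hj
    obtain ⟨hlen, hget, hA⟩ := ih (by omega)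
    have hr : rlist (j + 1) = rlist j ++ [((j + 2 : Nat) : Int)] := by
      simp [rlist, List.range_succ]
    have hd3 : (j + 2) / 3 <= j + 1 := by
      have := Nat.div_lt_self (n := j + 2) (by omega) (by omega : 1 < 3); omega
    have hd2 : (j + 2) / 2 <= j + 1 := by
      have := Nat.div_lt_self (n := j + 2) (by omega) (by omega : 1 < 2); omega
    have hb : bStep (costsUpTo N j) ((j + 2 : Nat) : Int)
        = (costsUpTo N j).set (j + 2) (costF (j + 2)) :=
      bStep_eq _ _ (by omega) (by simpa using hget (j + 1) (by omega))
        (hget _ hd3) (hget _ hd2)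
    have hcost : costsUpTo N (j + 1) = (costsUpTo N j).set (j + 2) (costF (j + 2)) := by
      rw [costsUpTo, hr, List.foldl_append]
      simpa [costsUpTo] using hb
    refine ⟨by simp [hcost, hlen], ?_, ?_⟩
    · intro i hi
      rw [hcost]
      by_cases hij : i = j + 2
      · subst hij
        have hlt : j + 2 < (costsUpTo N j).length := by omega
        simp [List.getD_eq_getElem?_getD, hlt]
      · have : ¬ (j + 2 = i) := fun h => hij h.symm
        simp only [List.getD_eq_getElem?_getD, List.getElem?_set, this, if_false]
        exact hget i (by omega)
    · have hgs : ∀ i, i <= j + 1 →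
          ((List.range (j + 2)).map seqF).getD i [] = seqF i := by
        intro i hi
        have : i < j + 2 := by omega
        simp [List.getD_eq_getElem?_getD, this]
      have ha : aStep (costsUpTo N j, (List.range (j + 2)).map seqF) ((j + 2 : Nat) : Int)
          = ((costsUpTo N j).set (j + 2) (costF (j + 2)),
             (List.range (j + 2)).map seqF ++ [seqF (j + 2)]) :=
        aStep_eq _ _ _ (by omega) (by omega) (by simpa using hget (j + 1) (by omega))
          (hget _ hd3) (hget _ hd2) (by simpa using hgs (j + 1) (by omega))
          (hgs _ hd3) (hgs _ hd2)
      rw [stateA, hr, List.foldl_append]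
      have : (rlist j).foldl aStep (List.replicate (N + 1) (0 : Int), ([[0], [1]] : List (List Int)))
          = stateA N j := rfl
      rw [this, hA]
      simp only [List.foldl_cons, List.foldl_nil, ha, hcost]
      simp [List.range_succ]

-- pulling the accumulator out of B's backtracking loop
lemma bBack_acc (cost : List Int) : ∀ m : Nat, ∀ v : Int, v.toNat <= m → ∀ p,
    bBack cost v p = p ++ bBack cost v [] := by
  intro m
  induction m with
  | zero =>
    intro v hv p
    rw [bBack, bBack]
    have : ¬ 1 < v := by omega
    simp [this]
  | succ m ih =>
    intro v hv p
    by_cases h : 1 < v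
    · rw [bBack, bBack]
      have t3 : (PySem.Int.floordiv v 3).toNat <= m := by
        rw [PySem.Int.floordiv_eq_ediv_of_pos (by norm_num)]
        have h1 : v / 3 < v := Int.ediv_lt_of_lt_mul (by norm_num) (by omega)
        have h2 : 0 <= v / 3 := Int.ediv_nonneg (by omega) (by norm_num)
        omega
      have t2 : (PySem.Int.floordiv v 2).toNat <= m := by
        rw [PySem.Int.floordiv_eq_ediv_of_pos (by norm_num)]
        have h1 : v / 2 < v := Int.ediv_lt_of_lt_mul (by norm_num) (by omega)
        have h2 : 0 <= v / 2 := Int.ediv_nonneg (by omega) (by norm_num)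
        omega
      have t1 : (v - 1).toNat <= m := by omega
      simp only [dif_pos h]
      split_ifs <;>
        rw [ih _ (by assumption) (p ++ [v]), ih _ (by assumption) ([] ++ [v])] <;>
        simp
    · rw [bBack, bBack]
      simp [h]

-- backtracking over a correct cost array reconstructs seqF
lemma bBack_seq (N : Nat) (cost : List Int)
    (hc : ∀ i, i <= N → cost.getD i 0 = costF i) :
    ∀ v : Nat, 1 <= v → v <= N → (bBack cost (v : Int) []).reverse = seqF v := by
  intro v
  induction v using Nat.strong_induction_on with
  | _ v IH =>
    intro hv1 hvN
    by_cases hv2 : 2 <= v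
    · rw [bBack]
      have h1 : (1 : Int) < (v : Int) := by omega
      have hgv : PySem.List.pyGetD cost (v : Int) 0 = costF v := by
        rw [PySem.List.pyGetD_natCast]; exact hc v hvN
      have hg3 : PySem.List.pyGetD cost (PySem.Int.floordiv (v : Int) 3) 0 = costF (v / 3) := by
        rw [fdiv3, PySem.List.pyGetD_natCast]
        exact hc _ (le_trans (Nat.div_le_self v 3) hvN)
      have hg2 : PySem.List.pyGetD cost (PySem.Int.floordiv (v : Int) 2) 0 = costF (v / 2) := by
        rw [fdiv2, PySem.List.pyGetD_natCast]
        exact hc _ (le_trans (Nat.div_le_self v 2) hvN)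
      have hrec : ∀ w : Nat, w < v → 1 <= w →
          (bBack cost (w : Int) [(v : Int)]).reverse = seqF w ++ [(v : Int)] := by
        intro w hw hw1
        rw [bBack_acc cost (w : Int).toNat _ le_rfl [(v : Int)]]
        simp [IH w hw hw1 (by omega)]
      rw [dif_pos h1]
      simp only [List.nil_append, hgv, hg3, hg2, mod3, mod2]
      rw [seqF_two v hv2]
      unfold prevF
      have hp3 : v / 3 < v := Nat.div_lt_self (by omega) (by omega)
      have hp2 : v / 2 < v := Nat.div_lt_self (by omega) (by omega)
      by_cases c3 : v % 3 = 0
      · simp only [c3, Nat.cast_zero, reduceIte]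
        split_ifs with he
        · rw [fdiv3]
          exact hrec _ hp3 ((Nat.one_le_div_iff (by omega)).mpr (by omega))
        · rw [cast_sub_one v (by omega)]
          exact hrec _ (by omega) (by omega)
      · have h3' : ¬ ((v % 3 : Nat) : Int) = 0 := by omega
        have hm2 : (((v % 2 : Nat) : Int) = 0) ↔ (v % 2 = 0) := by omega
        simp only [if_neg h3', if_neg c3, hm2]
        split_ifs with he
        · rw [fdiv2]
          exact hrec _ hp2 ((Nat.one_le_div_iff (by omega)).mpr (by omega))
        · rw [cast_sub_one v (by omega)]
          exact hrec _ (by omega) (by omega)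
    · have hv : v = 1 := by omega
      subst hv
      rw [bBack]
      norm_num [seqF_one]

-- the loop list of both programs is rlist
lemma range_eq (n : Int) (N : Nat) (hn : n = (N : Int)) (hN : 1 <= N) :
    PySem.List.pyRange 2 (n + 1) 1 = rlist (N - 1) := by
  rw [PySem.List.pyRange_one, rlist]
  have : ((N : Int) + 1 - 2).toNat = N - 1 := by omega
  rw [hn, this]
  refine List.map_congr_left ?_
  intro k _
  omega

theorem optimal_operations_spec : Claim_equal_optimal_operations := by
  intro n _
  unfold Spec_optimal_operations optimal_operations optimal_operations_alt
  dsimp only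
  by_cases hn : n <= 1
  · rw [if_pos hn]
    rw [PySem.List.pyRange_one_eq_nil (by omega)]
    simp only [List.foldl_nil]
    decide
  · rw [if_neg hn]
    set N := n.toNat with hNdef
    have hn2 : n = (N : Int) := by omega
    have hN : 2 <= N := by omega
    obtain ⟨hlen, hget, hA⟩ := inv N hN (N - 1) (by omega)
    have hrepl : (n + 1).toNat = N + 1 := by omega
    have hrange : PySem.List.pyRange 2 (n + 1) 1 = rlist (N - 1) :=
      range_eq n N hn2 (by omega)
    -- A's side
    have hAside : (PySem.List.pyRange 2 (n + 1) 1).foldl aStep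
        (List.replicate (n + 1).toNat (0 : Int), ([[0], [1]] : List (List Int)))
        = (costsUpTo N (N - 1), (List.range (N + 1)).map seqF) := by
      rw [hrange, hrepl]
      rw [show List.foldl aStep (List.replicate (N + 1) (0 : Int), ([[0], [1]] : List (List Int)))
            (rlist (N - 1)) = stateA N (N - 1) from rfl, hA,
          show N - 1 + 2 = N + 1 by omega]
    rw [hAside]
    have hBside : (PySem.List.pyRange 2 (n + 1) 1).foldl bStep
        (List.replicate (n + 1).toNat (0 : Int)) = costsUpTo N (N - 1) := by
      rw [hrange, hrepl, costsUpTo]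
    rw [hBside]
    have hlast : PySem.List.pyGetD ((List.range (N + 1)).map seqF) (-1) [] = seqF N := by
      rw [List.range_succ]
      simp only [List.map_append, List.map_cons, List.map_nil]
      exact PySem.List.pyGetD_neg_one_append_singleton ..
    rw [hlast, hn2]
    have hc : ∀ i, i <= N → (costsUpTo N (N - 1)).getD i 0 = costF i := by
      intro i hi; exact hget i (by omega)
    rw [bBack_seq N _ hc N (by omega) le_rfl]
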